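-- pv_equiv track=rewrite | github.com/TheoBuchwald/UCPH-KVM | write_exact_ri.py | RI_basis_set_contraction
-- ===== SOURCE A (Python) =====
-- from typing import Counter, Dict, Generator, List, Tuple
--
-- def RI_basis_set_contraction(quant_num: List[int]) -> Dict[int, int]:
--     quant_contraction = Counter(quant_num)
--     new_quant_contraction = {}
--     for key1, val1 in quant_contraction.items():
--         for key2, val2 in quant_contraction.items():
--             if key1 == key2:
--                 for i in range(val1):
--                     for j in range(i,val2):
--                         try:
--                             new_quant_contraction[key1+key2] += 1
--                         except KeyError:
--                             new_quant_contraction[key1+key2] = 1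
--             elif key1 < key2:
--                 for i in range(val1):
--                     for j in range (val2):
--                         try:
--                             new_quant_contraction[key1+key2] += 1
--                         except KeyError:
--                             new_quant_contraction[key1+key2] = 1
--     return new_quant_contraction
-- ===== SOURCE B (Python) =====
-- from collections import Counter
-- from typing import Dict, List
--
-- def RI_basis_set_contraction(quant_num: List[int]) -> Dict[int, int]:
--     counts = Counter(quant_num)
--     out = {}
--     for key1, val1 in counts.items():
--         for key2, val2 in counts.items():
--             if key1 == key2:
--                 out[key1 + key2] = out.get(key1 + key2, 0) + val1 * (val1 + 1) // 2
--             elif key1 < key2: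
--                 out[key1 + key2] = out.get(key1 + key2, 0) + val1 * val2
--     return out
-- ===== Notes on version B (the rewrite author's own statement) =====
-- stated objective: faster
-- what changed: B replaces A's four nested loops (unit increments repeated val1*val2 resp. triangular-count times per key pair) with one double loop over the distinct keys that adds the closed-form contribution val1*val2 (key1<key2) or val1*(val1+1)//2 (key1==key2) in a single dict update.
import Mathlib
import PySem

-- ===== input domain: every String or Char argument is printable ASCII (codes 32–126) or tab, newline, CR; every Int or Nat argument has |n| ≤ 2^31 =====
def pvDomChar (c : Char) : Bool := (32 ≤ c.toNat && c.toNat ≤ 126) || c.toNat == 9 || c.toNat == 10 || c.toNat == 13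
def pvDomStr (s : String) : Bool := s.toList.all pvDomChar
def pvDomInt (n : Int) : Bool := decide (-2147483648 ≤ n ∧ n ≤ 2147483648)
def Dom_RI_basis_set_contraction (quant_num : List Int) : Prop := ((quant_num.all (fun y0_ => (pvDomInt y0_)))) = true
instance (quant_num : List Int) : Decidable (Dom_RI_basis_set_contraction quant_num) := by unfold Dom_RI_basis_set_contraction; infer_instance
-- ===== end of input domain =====

-- B replaces A's four nested unit-increment loops by a double loop over the distinct
-- keys adding the closed-form contribution (val1*val2 resp. val1*(val1+1)//2) at once.


-- ===== PORT A =====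
def RI_basis_set_contraction (quant_num : List Int) : List (Int × Int) :=
  let quant_contraction := PySem.Dict.counter quant_num
  let new_quant_contraction : PySem.Dict Int Int :=
    quant_contraction.items.foldl (fun nqc kv1 =>
      quant_contraction.items.foldl (fun nqc kv2 =>
        if kv1.1 == kv2.1 then
          (PySem.List.pyRange 0 kv1.2).foldl (fun nqc i =>
            (PySem.List.pyRange i kv2.2).foldl (fun nqc _ =>
              -- try/except KeyError increment: d[k] = d.get(k, 0) + 1
              nqc.insert (kv1.1 + kv2.1) (nqc.getD (kv1.1 + kv2.1) 0 + 1)) nqc) nqc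
        else if kv1.1 < kv2.1 then
          (PySem.List.pyRange 0 kv1.2).foldl (fun nqc _ =>
            (PySem.List.pyRange 0 kv2.2).foldl (fun nqc _ =>
              nqc.insert (kv1.1 + kv2.1) (nqc.getD (kv1.1 + kv2.1) 0 + 1)) nqc) nqc
        else nqc) nqc) PySem.Dict.empty
  new_quant_contraction.items

-- ===== PORT B =====
def RI_basis_set_contraction_alt (quant_num : List Int) : List (Int × Int) :=
  let counts := PySem.Dict.counter quant_num
  let out : PySem.Dict Int Int :=
    counts.items.foldl (fun out kv1 =>
      counts.items.foldl (fun out kv2 =>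
        if kv1.1 == kv2.1 then
          out.insert (kv1.1 + kv2.1)
            (out.getD (kv1.1 + kv2.1) 0 + PySem.Int.floordiv (kv1.2 * (kv1.2 + 1)) 2)
        else if kv1.1 < kv2.1 then
          out.insert (kv1.1 + kv2.1) (out.getD (kv1.1 + kv2.1) 0 + kv1.2 * kv2.2)
        else out) out) PySem.Dict.empty
  out.items

-- ===== PRECONDITION & SPEC =====
def Spec_RI_basis_set_contraction (quant_num : List Int) (out : List (Int × Int)) : Prop := out = RI_basis_set_contraction_alt quant_num
instance (quant_num : List Int) (out : List (Int × Int)) : Decidable (Spec_RI_basis_set_contraction quant_num out) := by unfold Spec_RI_basis_set_contraction; infer_instance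

-- ===== CLAIM (what is proved, stated in full; the proofs are below) =====
def Claim_equal_RI_basis_set_contraction : Prop := ∀ (quant_num : List Int), Dom_RI_basis_set_contraction quant_num → Spec_RI_basis_set_contraction quant_num (RI_basis_set_contraction quant_num)

-- ===== LEMMAS AND PROOFS =====

theorem pv_pyRange_ne_nil {a b : Int} (h : a < b) : PySem.List.pyRange a b ≠ [] := by
  rw [PySem.List.pyRange_one_cons h]
  simp

-- A loop of inserts at one key k, each adding c i on top of the current count, is one
-- insert of the total (or a no-op for the empty loop).
theorem pv_foldl_insert_addc {α : Type} (l : List α) (c : α → Int) (k : Int)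
    (d : PySem.Dict Int Int) (h : l ≠ []) :
    l.foldl (fun d i => d.insert k (d.getD k 0 + c i)) d
      = d.insert k (d.getD k 0 + (l.map c).sum) := by
  induction l generalizing d with
  | nil => exact absurd rfl h
  | cons x xs ih =>
    rw [List.foldl_cons]
    cases xs with
    | nil => simp
    | cons y ys =>
      rw [ih _ (by simp)]
      rw [PySem.Dict.getD_insert_self, PySem.Dict.insert_insert_self]
      simp only [List.map_cons, List.sum_cons]
      congr 1
      ring

-- The unit-increment loop: each pass adds 1, so the whole loop adds the length.
theorem pv_incr_loop (l : List Int) (k : Int) (d : PySem.Dict Int Int) (h : l ≠ []) :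
    l.foldl (fun d _ => d.insert k (d.getD k 0 + 1)) d
      = d.insert k (d.getD k 0 + (l.length : Int)) := by
  have := pv_foldl_insert_addc l (fun _ => 1) k d h
  simpa [PySem.List.sum_map_const_int] using this

-- Gauss: the triangular sum A accumulates one by one, in closed form (doubled).
theorem pv_tri_sum (n : Int) : ∀ (m : Nat) (a : Int), a + m = n →
    2 * ((PySem.List.pyRange a n).map (fun i => n - i)).sum = m * (m + 1) := by
  intro m
  induction m with
  | zero =>
    intro a h
    have hlen : (PySem.List.pyRange a n).length = 0 := by
      rw [PySem.List.length_pyRange_one]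
      omega
    rw [List.eq_nil_of_length_eq_zero hlen]
    simp
  | succ p ih =>
    intro a h
    have hab : a < n := by omega
    rw [PySem.List.pyRange_one_cons hab]
    simp only [List.map_cons, List.sum_cons]
    have ih' := ih (a + 1) (by omega)
    push_cast
    push_cast at ih' h
    linear_combination ih' - 2 * h

-- A's key1 == key2 branch: the triangular double loop adds n*(n+1)//2 at key k.
theorem pv_equal_branch (n : Int) (hn : 1 ≤ n) (k : Int) (d : PySem.Dict Int Int) :
    (PySem.List.pyRange 0 n).foldl (fun d i =>
        (PySem.List.pyRange i n).foldl
          (fun d _ => d.insert k (d.getD k 0 + 1)) d) d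
      = d.insert k (d.getD k 0 + PySem.Int.floordiv (n * (n + 1)) 2) := by
  have hstep : ∀ (d : PySem.Dict Int Int), ∀ i ∈ PySem.List.pyRange 0 n,
      (PySem.List.pyRange i n).foldl (fun d _ => d.insert k (d.getD k 0 + 1)) d
        = d.insert k (d.getD k 0 + (n - i)) := by
    intro d i hi
    obtain ⟨h0, hlt⟩ := (PySem.List.mem_pyRange_one).mp hi
    rw [pv_incr_loop _ _ _ (pv_pyRange_ne_nil hlt)]
    rw [PySem.List.length_pyRange_one]
    congr 1
    omega
  rw [PySem.List.foldl_congr_mem _ _ (fun d i => d.insert k (d.getD k 0 + (n - i))) d hstep]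
  rw [pv_foldl_insert_addc _ _ _ _ (pv_pyRange_ne_nil (by omega))]
  have h2 : 2 * ((PySem.List.pyRange 0 n).map (fun i => n - i)).sum = n * (n + 1) := by
    have := pv_tri_sum n n.toNat 0 (by omega)
    have hm : (n.toNat : Int) = n := Int.toNat_of_nonneg (by omega)
    rw [hm] at this
    linarith [this]
  have hfd : PySem.Int.floordiv (n * (n + 1)) 2
      = ((PySem.List.pyRange 0 n).map (fun i => n - i)).sum := by
    rw [PySem.Int.floordiv_eq_iff_of_pos (by norm_num)]
    constructor <;> linarith [h2]
  rw [← hfd]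

-- A's key1 < key2 branch: the rectangular double loop adds n1*n2 at key k.
theorem pv_lt_branch (n1 n2 : Int) (h1 : 1 ≤ n1) (h2 : 1 ≤ n2) (k : Int)
    (d : PySem.Dict Int Int) :
    (PySem.List.pyRange 0 n1).foldl (fun d _ =>
        (PySem.List.pyRange 0 n2).foldl
          (fun d _ => d.insert k (d.getD k 0 + 1)) d) d
      = d.insert k (d.getD k 0 + n1 * n2) := by
  have hstep : ∀ (d : PySem.Dict Int Int), ∀ i ∈ PySem.List.pyRange 0 n1,
      (PySem.List.pyRange 0 n2).foldl (fun d _ => d.insert k (d.getD k 0 + 1)) d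
        = d.insert k (d.getD k 0 + n2) := by
    intro d i _
    rw [pv_incr_loop _ _ _ (pv_pyRange_ne_nil (by omega))]
    rw [PySem.List.length_pyRange_one]
    congr 1
    omega
  rw [PySem.List.foldl_congr_mem _ _ (fun d _ => d.insert k (d.getD k 0 + n2)) d hstep]
  rw [pv_foldl_insert_addc (PySem.List.pyRange 0 n1) (fun _ => n2) k d (pv_pyRange_ne_nil (by omega))]
  rw [PySem.List.sum_map_const_int, PySem.List.length_pyRange_one]
  have hc : (((n1 - 0).toNat : Nat) : Int) = n1 := by omega
  rw [hc]

theorem pv_main (quant_num : List Int) :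
    RI_basis_set_contraction quant_num = RI_basis_set_contraction_alt quant_num := by
  unfold RI_basis_set_contraction RI_basis_set_contraction_alt
  simp only [PySem.Dict.items_counter, List.foldl_map]
  congr 1
  apply PySem.List.foldl_congr_mem
  intro acc k1 h1
  apply PySem.List.foldl_congr_mem
  intro d k2 h2
  have c1pos : 1 ≤ ((quant_num.count k1 : Nat) : Int) := by
    have hm : k1 ∈ quant_num := (PySem.Set.mem_ofList _ _).mp h1
    have := List.count_pos_iff.mpr hm
    omega
  have c2pos : 1 ≤ ((quant_num.count k2 : Nat) : Int) := by
    have hm : k2 ∈ quant_num := (PySem.Set.mem_ofList _ _).mp h2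
    have := List.count_pos_iff.mpr hm
    omega
  by_cases heq : k1 = k2
  · subst heq
    simp only [beq_self_eq_true, if_true]
    exact pv_equal_branch _ c1pos _ d
  · simp only [beq_iff_eq, heq, if_false]
    by_cases hlt : k1 < k2
    · simp only [hlt, if_true]
      exact pv_lt_branch _ _ c1pos c2pos _ d
    · simp only [hlt, if_false]

-- ===== VERDICT (by name: the statement is the Claim_ definition above) =====
theorem RI_basis_set_contraction_spec : Claim_equal_RI_basis_set_contraction := by
  intro quant_num _
  unfold Spec_RI_basis_set_contraction
  exact pv_main quant_num
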